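-- pv_equiv track=rewrite | github.com/Tarkleigh/CardGen | XMLParser.py | remove_excessive_new_lines
-- ===== SOURCE A (Python) =====
-- def remove_excessive_new_lines(string):
--     newlines = 0
--     index = string.find('\n')
--
--     while index != -1:
--         newlines += 1
--         if newlines >= 4:
--             # snip string after the fourth new line
--             return string[:index]
--         index = string.find('\n', index + 1)
--
--     # not too many new lines, return string unchanged
--     return string
-- ===== SOURCE B (Python) =====
-- def remove_excessive_new_lines(string):
--     parts = string.split('\n', 4)
--     if len(parts) < 5:
--         # fewer than four newlines, return string unchanged
--         return string
--     return '\n'.join(parts[:4])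
-- ===== Notes on version B (the rewrite author's own statement) =====
-- stated objective: simpler
-- what changed: Replaces the index-tracking find() counting loop with a single split on the newline character with maxsplit 4, a length test, and a rejoin of the first four segments.
import Mathlib
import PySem

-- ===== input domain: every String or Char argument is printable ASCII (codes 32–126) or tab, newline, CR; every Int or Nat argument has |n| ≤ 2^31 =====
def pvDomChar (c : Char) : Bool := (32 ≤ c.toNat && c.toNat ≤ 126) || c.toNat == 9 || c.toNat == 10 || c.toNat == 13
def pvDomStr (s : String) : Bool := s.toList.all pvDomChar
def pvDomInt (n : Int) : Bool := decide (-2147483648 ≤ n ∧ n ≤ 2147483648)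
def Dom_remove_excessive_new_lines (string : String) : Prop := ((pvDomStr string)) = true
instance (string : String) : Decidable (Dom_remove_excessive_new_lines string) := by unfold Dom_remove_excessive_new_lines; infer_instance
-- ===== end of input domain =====

-- B replaces A's index-tracking find() counting loop by split('\n', 4) + rejoin of the first four pieces (simpler decomposition, same value).


-- ===== PORT A =====
-- A's while loop: `newlines` counts found newlines, `index` is the result of the last find;
-- it terminates because `newlines` is bumped each iteration and the loop returns at 4.
def pvLoopA (s : List Char) (newlines : Nat) (index : Int) : List Char :=
  if index ≠ -1 then
    if 4 ≤ newlines + 1 then PySem.Chars.slice s none (some index)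
    else pvLoopA s (newlines + 1) (PySem.Chars.findFrom s ['\n'] (index + 1))
  else s
termination_by 4 - newlines
decreasing_by omega

def remove_excessive_new_lines (string : String) : String :=
  String.ofList (pvLoopA string.toList 0 (PySem.Chars.find string.toList ['\n']))

-- ===== PORT B =====
def remove_excessive_new_lines_alt (string : String) : String :=
  let parts := PySem.Chars.splitOnMax string.toList ['\n'] 4
  if parts.length < 5 then string
  else String.ofList (PySem.Chars.join ['\n'] (parts.take 4))

-- ===== PRECONDITION & SPEC =====
def Spec_remove_excessive_new_lines (string : String) (out : String) : Prop := out = remove_excessive_new_lines_alt string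
instance (string : String) (out : String) : Decidable (Spec_remove_excessive_new_lines string out) := by unfold Spec_remove_excessive_new_lines; infer_instance

-- ===== CLAIM (what is proved, stated in full; the proofs are below) =====
def Claim_equal_remove_excessive_new_lines : Prop := ∀ (string : String), Dom_remove_excessive_new_lines string → Spec_remove_excessive_new_lines string (remove_excessive_new_lines string)

-- ===== LEMMAS AND PROOFS =====

-- nlpos r l = index of the (r+1)-th newline in l, if any
def nlpos : Nat → List Char → Option Nat
  | _, [] => none
  | 0, c :: t => if c = '\n' then some 0 else (nlpos 0 t).map (· + 1)
  | r + 1, c :: t => if c = '\n' then (nlpos r t).map (· + 1) else (nlpos (r + 1) t).map (· + 1)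

def enc : Option Nat → Int
  | none => -1
  | some i => (i : Int)

-- clean recursive model of splitOnMax with singleton separator '\n'
def sp : Nat → List Char → List (List Char)
  | _, [] => [[]]
  | 0, l => [l]
  | m + 1, c :: t => if c = '\n' then [] :: sp m t else (sp (m + 1) t).modifyHead (c :: ·)

theorem nlpos_none_succ : ∀ (l : List Char) (r : Nat), nlpos r l = none → nlpos (r + 1) l = none := by
  intro l
  induction l with
  | nil => intro r _; rfl
  | cons c t ih =>
    intro r h
    by_cases hc : c = '\n'
    · cases r with
      | zero => simp [nlpos, hc] at h
      | succ r' =>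
        simp only [nlpos, if_pos hc, Option.map_eq_none_iff] at h ⊢
        exact ih r' h
    · cases r with
      | zero =>
        simp only [nlpos, if_neg hc, Option.map_eq_none_iff] at h ⊢
        exact ih 0 h
      | succ r' =>
        simp only [nlpos, if_neg hc, Option.map_eq_none_iff] at h ⊢
        exact ih (r' + 1) h

theorem nlpos_none_le : ∀ (r r' : Nat) (l : List Char), r ≤ r' → nlpos r l = none → nlpos r' l = none := by
  intro r r' l h hn
  induction r' with
  | zero =>
    have : r = 0 := by omega
    rw [this] at hn; exact hn
  | succ k ih =>
    rcases Nat.lt_or_ge r (k + 1) with hlt | hge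
    · exact nlpos_none_succ l k (ih (by omega))
    · have : r = k + 1 := by omega
      rw [this] at hn; exact hn

theorem nlpos_some_lt : ∀ (l : List Char) (r i : Nat), nlpos r l = some i → i < l.length := by
  intro l
  induction l with
  | nil => intro r i h; simp [nlpos] at h
  | cons c t ih =>
    intro r i h
    by_cases hc : c = '\n'
    · cases r with
      | zero =>
        simp only [nlpos, if_pos hc, Option.some.injEq] at h
        simp [← h]
      | succ r' =>
        simp only [nlpos, if_pos hc, Option.map_eq_some_iff] at h
        obtain ⟨i', hi', rfl⟩ := h
        have := ih r' i' hi'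
        simp; omega
    · cases r with
      | zero =>
        simp only [nlpos, if_neg hc, Option.map_eq_some_iff] at h
        obtain ⟨i', hi', rfl⟩ := h
        have := ih 0 i' hi'
        simp; omega
      | succ r' =>
        simp only [nlpos, if_neg hc, Option.map_eq_some_iff] at h
        obtain ⟨i', hi', rfl⟩ := h
        have := ih (r' + 1) i' hi'
        simp; omega

theorem nlpos_succ_drop : ∀ (l : List Char) (r i : Nat), nlpos r l = some i →
    nlpos (r + 1) l = (nlpos 0 (l.drop (i + 1))).map (fun d => i + 1 + d) := by
  intro l
  induction l with
  | nil => intro r i h; simp [nlpos] at h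
  | cons c t ih =>
    intro r i h
    by_cases hc : c = '\n'
    · cases r with
      | zero =>
        simp only [nlpos, if_pos hc, Option.some.injEq] at h
        subst h
        simp only [nlpos, if_pos hc, List.drop_succ_cons, List.drop_zero]
        rcases hn : nlpos 0 t with _ | d <;> simp [Nat.add_comm]
      | succ r' =>
        simp only [nlpos, if_pos hc, Option.map_eq_some_iff] at h
        obtain ⟨i', hi', rfl⟩ := h
        have hrec := ih r' i' hi'
        simp only [nlpos, if_pos hc, hrec, List.drop_succ_cons]
        rcases hn : nlpos 0 (t.drop (i' + 1)) with _ | d <;> simp [Nat.add_comm, Nat.add_left_comm]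
    · cases r with
      | zero =>
        simp only [nlpos, if_neg hc, Option.map_eq_some_iff] at h
        obtain ⟨i', hi', rfl⟩ := h
        have hrec := ih 0 i' hi'
        simp only [nlpos, if_neg hc, hrec, List.drop_succ_cons]
        rcases hn : nlpos 0 (t.drop (i' + 1)) with _ | d <;> simp [Nat.add_comm, Nat.add_left_comm]
      | succ r' =>
        simp only [nlpos, if_neg hc, Option.map_eq_some_iff] at h
        obtain ⟨i', hi', rfl⟩ := h
        have hrec := ih (r' + 1) i' hi'
        simp only [nlpos, if_neg hc, hrec, List.drop_succ_cons]
        rcases hn : nlpos 0 (t.drop (i' + 1)) with _ | d <;> simp [Nat.add_comm, Nat.add_left_comm]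

theorem find_go_eq : ∀ (l : List Char) (k : Nat),
    PySem.Chars.find.go ['\n'] l k = (match nlpos 0 l with | none => -1 | some i => ((k + i : Nat) : Int)) := by
  intro l
  induction l with
  | nil => intro k; rfl
  | cons c t ih =>
    intro k
    by_cases hc : c = '\n'
    · subst hc
      simp [PySem.Chars.find.go, nlpos, List.isPrefixOf]
    · have hpre : (['\n'] : List Char).isPrefixOf (c :: t) = false := by
        simp [List.isPrefixOf]; intro h; exact hc h.symm
      rw [show PySem.Chars.find.go ['\n'] (c :: t) k = if (['\n'] : List Char).isPrefixOf (c :: t) then (k : Int) else PySem.Chars.find.go ['\n'] t (k + 1) from rfl]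
      rw [hpre]
      simp only [Bool.false_eq_true, if_false, ih (k + 1)]
      simp only [nlpos, if_neg hc]
      rcases hn : nlpos 0 t with _ | d
      · simp
      · simp; ring

theorem find_eq_nlpos (l : List Char) : PySem.Chars.find l ['\n'] = enc (nlpos 0 l) := by
  rw [show PySem.Chars.find l ['\n'] = PySem.Chars.find.go ['\n'] l 0 from rfl, find_go_eq l 0]
  rcases hn : nlpos 0 l with _ | d <;> simp [enc]

theorem loopA_spec : ∀ (k j : Nat) (l : List Char), j + k = 3 →
    pvLoopA l j (enc (nlpos j l)) = (match nlpos 3 l with | none => l | some i => l.take i) := by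
  intro k
  induction k with
  | zero =>
    intro j l hj
    have hj3 : j = 3 := by omega
    subst hj3
    rcases hn : nlpos 3 l with _ | i
    · rw [pvLoopA]
      simp [enc]
    · rw [pvLoopA]
      have hne : enc (some i) ≠ -1 := by simp [enc]
      rw [if_pos hne]
      simp only [enc]
      rw [if_pos (by omega)]
      simp [PySem.List.slice_to l (show (0:Int) ≤ (i:Int) by omega)]
  | succ k ih =>
    intro j l hj
    rcases hn : nlpos j l with _ | i
    · rw [pvLoopA]
      simp only [enc, ne_eq, not_true_eq_false, if_false]
      have h3 : nlpos 3 l = none := nlpos_none_le j 3 l (by omega) hn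
      simp [h3]
    · rw [pvLoopA]
      have hne : enc (some i) ≠ -1 := by simp [enc]
      rw [if_pos hne]
      rw [if_neg (by omega)]
      have hi : i < l.length := nlpos_some_lt l j i hn
      have hstep : PySem.Chars.findFrom l ['\n'] (enc (some i) + 1) = enc (nlpos (j + 1) l) := by
        have hcast : enc (some i) + 1 = ((i + 1 : Nat) : Int) := by simp [enc]
        rw [hcast, PySem.Chars.findFrom_natCast l ['\n'] (i + 1) (by omega)]
        rw [find_eq_nlpos (l.drop (i + 1)), nlpos_succ_drop l j i hn]
        rcases hd : nlpos 0 (l.drop (i + 1)) with _ | d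
        · simp [enc]
        · simp [enc]
      rw [hstep]
      exact ih (j + 1) l (by omega)

theorem sp_ne_nil : ∀ (m : Nat) (l : List Char), sp m l ≠ [] := by
  intro m l
  match m, l with
  | _, [] => simp [sp]
  | 0, c :: t => simp [sp]
  | m + 1, c :: t =>
    by_cases hc : c = '\n'
    · simp [sp, hc]
    · simp only [sp, if_neg hc]
      rcases h : sp (m + 1) t with _ | ⟨p, ps⟩
      · exact absurd h (sp_ne_nil (m + 1) t)
      · simp [List.modifyHead]

theorem sp_zero (l : List Char) : sp 0 l = [l] := by
  cases l <;> rfl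

theorem modifyHead_nil_append (xs : List (List Char)) : xs.modifyHead (fun x => [] ++ x) = xs := by
  cases xs <;> simp [List.modifyHead]

theorem sp_go_eq : ∀ (fuel : Nat) (l cur : List Char) (acc : List (List Char)) (m : Nat), l.length < fuel →
    PySem.Chars.splitOnMax.go ['\n'] fuel m l cur acc = acc.reverse ++ (sp m l).modifyHead (cur.reverse ++ ·) := by
  intro fuel
  induction fuel with
  | zero => intro l cur acc m h; omega
  | succ fuel ih =>
    intro l cur acc m h
    match l, m with
    | [], m =>
      rw [PySem.Chars.splitOnMax.go.eq_def]
      simp [sp, List.modifyHead]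
    | c :: rest, 0 =>
      rw [PySem.Chars.splitOnMax.go.eq_def]
      simp [sp, List.modifyHead]
    | c :: rest, m + 1 =>
      rw [PySem.Chars.splitOnMax.go.eq_def]
      simp only [Nat.add_one_ne_zero, if_false]
      by_cases hc : c = '\n'
      · have hpre : (['\n'] : List Char).isPrefixOf (c :: rest) = true := by
          simp [List.isPrefixOf, hc]
        rw [hpre]
        simp only [if_true]
        rw [show List.drop (['\n'] : List Char).length (c :: rest) = rest from rfl]
        rw [ih rest [] (cur.reverse :: acc) (m + 1 - 1) (by simpa using h)]
        simp only [sp, if_pos hc, List.reverse_cons, List.reverse_nil, List.nil_append]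
        simp only [List.modifyHead]
        rcases hs : sp m rest with _ | ⟨p, ps⟩ <;> simp [hs]
      · have hpre : (['\n'] : List Char).isPrefixOf (c :: rest) = false := by
          simp [List.isPrefixOf]; intro h'; exact hc h'.symm
        rw [hpre]
        simp only [Bool.false_eq_true, if_false]
        rw [ih rest (c :: cur) acc (m + 1) (by simpa using h)]
        simp only [sp, if_neg hc]
        congr 1
        rcases hs : sp (m + 1) rest with _ | ⟨p, ps⟩
        · exact absurd hs (sp_ne_nil (m + 1) rest)
        · simp [List.modifyHead]

theorem splitOnMax_eq_sp (l : List Char) (m : Nat) : PySem.Chars.splitOnMax l ['\n'] (m : Int) = sp m l := by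
  rw [PySem.Chars.splitOnMax]
  rw [if_neg (by omega)]
  rw [show ((m : Int)).toNat = m from by omega]
  rw [sp_go_eq (l.length + 1) l [] [] m (by omega)]
  simp only [List.reverse_nil, List.nil_append]
  exact modifyHead_nil_append _

theorem join_cons_head (c : Char) (p : List Char) (ps : List (List Char)) :
    PySem.Chars.join ['\n'] ((c :: p) :: ps) = c :: PySem.Chars.join ['\n'] (p :: ps) := by
  cases ps with
  | nil => simp [PySem.Chars.join_singleton]
  | cons q qs => simp [PySem.Chars.join_cons_cons]

theorem nlpos_cons_ne (c : Char) (t : List Char) (m : Nat) (hc : ¬ c = '\n') :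
    nlpos m (c :: t) = (nlpos m t).map (· + 1) := by
  cases m <;> simp [nlpos, hc]

theorem sp_spec : ∀ (l : List Char) (m : Nat),
    (match nlpos m l with
      | none => (sp (m + 1) l).length ≤ m + 1
      | some i => (sp (m + 1) l).length = m + 2 ∧ PySem.Chars.join ['\n'] ((sp (m + 1) l).take (m + 1)) = l.take i) := by
  intro l
  induction l with
  | nil => intro m; simp [nlpos, sp]
  | cons c t ih =>
    intro m
    by_cases hc : c = '\n'
    · cases m with
      | zero =>
        simp only [nlpos, if_pos hc, sp, sp_zero]
        refine ⟨rfl, ?_⟩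
        simp [PySem.Chars.join_singleton]
      | succ m' =>
        simp only [nlpos, if_pos hc, sp]
        have := ih m'
        rcases hn : nlpos m' t with _ | i
        · rw [hn] at this
          simp only [Option.map_none]
          simp only [List.length_cons]
          omega
        · rw [hn] at this
          obtain ⟨hlen, hjoin⟩ := this
          simp only [Option.map_some]
          constructor
          · simp only [List.length_cons]; omega
          · rcases hs : sp (m' + 1) t with _ | ⟨p, ps⟩
            · exact absurd hs (sp_ne_nil (m' + 1) t)
            · rw [hs] at hjoin
              rw [List.take_succ_cons, List.take_succ_cons]
              rw [List.take_succ_cons] at hjoin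
              rw [PySem.Chars.join_cons_cons, hjoin]
              simp [hc]
    · rw [nlpos_cons_ne c t m hc]
      simp only [sp, if_neg hc]
      have := ih m
      rcases hn : nlpos m t with _ | i
      · rw [hn] at this
        simp only [Option.map_none, List.length_modifyHead]
        exact this
      · rw [hn] at this
        obtain ⟨hlen, hjoin⟩ := this
        simp only [Option.map_some]
        constructor
        · simp only [List.length_modifyHead]; exact hlen
        · rcases hs : sp (m + 1) t with _ | ⟨p, ps⟩
          · exact absurd hs (sp_ne_nil (m + 1) t)
          · rw [hs] at hjoin
            rw [List.take_succ_cons] at hjoin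
            simp only [List.modifyHead, List.take_succ_cons]
            rw [join_cons_head c p (ps.take m), hjoin]

-- ===== VERDICT (by name: the statement is the Claim_ definition above) =====
theorem remove_excessive_new_lines_spec : Claim_equal_remove_excessive_new_lines := by
  intro s _
  unfold Spec_remove_excessive_new_lines remove_excessive_new_lines remove_excessive_new_lines_alt
  rw [find_eq_nlpos s.toList]
  rw [loopA_spec 3 0 s.toList (by omega)]
  rw [show (4 : Int) = ((4 : Nat) : Int) from rfl, splitOnMax_eq_sp s.toList 4]
  have := sp_spec s.toList 3
  rcases hn : nlpos 3 s.toList with _ | i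
  · rw [hn] at this
    rw [if_pos (by simpa using Nat.lt_succ_of_le this)]
    simp
  · rw [hn] at this
    obtain ⟨hlen, hjoin⟩ := this
    rw [if_neg (by rw [hlen]; omega)]
    rw [hjoin]
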